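-- pv_equiv track=rewrite | github.com/rKrishna97/object-detection-and-vqa | object_detection.py | obj_cnt_pos
-- ===== SOURCE A (Python) =====
-- def obj_cnt_pos(obj_pos_cnt_dict):
--     text = ""
--     for p in list(obj_pos_cnt_dict.keys()):
--
--         for i in list(obj_pos_cnt_dict[p].keys()):
--             if text == "":
--                 if obj_pos_cnt_dict[p][i] == 1:
--                     text = text + f"There is {obj_pos_cnt_dict[p][i]} {i} in the {p}"
--                 elif obj_pos_cnt_dict[p][i] > 1:
--                     text = text + f"There are {obj_pos_cnt_dict[p][i]} {i}s in the {p}"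
--
--             elif text != "":
--                 if i==list(obj_pos_cnt_dict[p].keys())[-1]:
--                     if obj_pos_cnt_dict[p][i] == 1:
--                         text = text + f" and {obj_pos_cnt_dict[p][i]} {i} in the {p}"
--                     elif obj_pos_cnt_dict[p][i] >1:
--                         text = text + f" and {obj_pos_cnt_dict[p][i]} {i}s in the {p}"
--                 elif i!=list(obj_pos_cnt_dict[p].keys())[-1]:
--                     if obj_pos_cnt_dict[p][i] == 1:
--                         text = text + f", {obj_pos_cnt_dict[p][i]} {i} in the {p}"
--                     elif obj_pos_cnt_dict[p][i] > 1:
--                         text = text + f", {obj_pos_cnt_dict[p][i]} {i}s in the {p}"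
--     return text
-- ===== SOURCE B (Python) =====
-- def _core(cnt, i, p):
--     if cnt == 1:
--         return f"{cnt} {i} in the {p}"
--     else:
--         return f"{cnt} {i}s in the {p}"
--
-- def obj_cnt_pos(obj_pos_cnt_dict):
--     # pass 1: collect (core, is_singular, is_last_key) for every item with count >= 1
--     parts = []
--     for p, items in obj_pos_cnt_dict.items():
--         keys = list(items.keys())
--         last = keys[-1] if keys else None
--         for i, cnt in items.items():
--             if cnt >= 1:
--                 parts.append((_core(cnt, i, p), cnt == 1, i == last))
--     # pass 2: assemble the sentence
--     if not parts:
--         return ""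
--     core0, one0, _ = parts[0]
--     out = ("There is " if one0 else "There are ") + core0
--     for core, _, is_last in parts[1:]:
--         out += (" and " if is_last else ", ") + core
--     return out
-- ===== Notes on version B (the rewrite author's own statement) =====
-- stated objective: alternative
-- what changed: Replaces A's single interleaved pass that chooses each prefix from the mutable text (the text=='' flag and per-iteration [-1] last-key lookup) with a two-pass collect-then-assemble shape: pass 1 gathers (core, is_singular, is_last_key) tuples for items with count >= 1, pass 2 joins them, choosing 'There is/are ' for index 0 and ' and '/', ' separators after.
import Mathlib
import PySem

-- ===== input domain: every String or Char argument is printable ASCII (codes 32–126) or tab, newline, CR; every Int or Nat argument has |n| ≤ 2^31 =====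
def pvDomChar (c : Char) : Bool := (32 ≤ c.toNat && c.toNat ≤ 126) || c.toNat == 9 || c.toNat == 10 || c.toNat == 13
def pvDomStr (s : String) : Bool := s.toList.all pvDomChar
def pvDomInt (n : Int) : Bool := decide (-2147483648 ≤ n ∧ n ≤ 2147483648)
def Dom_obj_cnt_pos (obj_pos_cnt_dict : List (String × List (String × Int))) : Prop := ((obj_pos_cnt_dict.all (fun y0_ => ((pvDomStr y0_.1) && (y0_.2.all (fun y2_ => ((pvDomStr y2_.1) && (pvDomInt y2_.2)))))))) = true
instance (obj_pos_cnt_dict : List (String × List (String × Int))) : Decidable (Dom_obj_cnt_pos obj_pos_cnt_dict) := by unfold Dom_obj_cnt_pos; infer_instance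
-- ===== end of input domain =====

-- B replaces A's single interleaved pass (prefix chosen from the mutable text's emptiness,
-- last-key lookup re-done every iteration) with a collect-then-assemble two-pass shape.
-- Both Pythons receive a dict of dicts; the association lists are read with Python's
-- dict(pairs) semantics (duplicate keys overwrite in place) via PySem.Dict.ofList.

-- ===== PORT A =====
-- inner loop `for i in list(obj_pos_cnt_dict[p].keys()): …` with accumulator `text`
def objCntAInner (d : PySem.Dict String Int) (p : String) : String → List String → String
  | text, [] => text
  | text, i :: rest =>
    let cnt := d.getD i 0  -- obj_pos_cnt_dict[p][i]: i is drawn from d's keys, so the lookup succeeds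
    -- list(obj_pos_cnt_dict[p].keys())[-1]: d's key list is nonempty whenever the loop body runs,
    -- so pyGet? is some and the "" default is unreachable
    let lastK := (PySem.List.pyGet? d.keys (-1)).getD ""
    let text' :=
      if text == "" then
        if cnt == 1 then
          text ++ "There is " ++ PySem.Int.toStr cnt ++ " " ++ i ++ " in the " ++ p
        else if cnt > 1 then
          text ++ "There are " ++ PySem.Int.toStr cnt ++ " " ++ i ++ "s in the " ++ p
        else text
      else
        if i == lastK then
          if cnt == 1 then
            text ++ " and " ++ PySem.Int.toStr cnt ++ " " ++ i ++ " in the " ++ p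
          else if cnt > 1 then
            text ++ " and " ++ PySem.Int.toStr cnt ++ " " ++ i ++ "s in the " ++ p
          else text
        else
          if cnt == 1 then
            text ++ ", " ++ PySem.Int.toStr cnt ++ " " ++ i ++ " in the " ++ p
          else if cnt > 1 then
            text ++ ", " ++ PySem.Int.toStr cnt ++ " " ++ i ++ "s in the " ++ p
          else text
    objCntAInner d p text' rest

-- outer loop `for p in list(obj_pos_cnt_dict.keys()): …`
def objCntAOuter (outer : PySem.Dict String (PySem.Dict String Int)) :
    String → List String → String
  | text, [] => text
  | text, p :: ps =>
    let d := outer.getD p PySem.Dict.empty  -- obj_pos_cnt_dict[p]: p is drawn from outer's keys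
    objCntAOuter outer (objCntAInner d p text d.keys) ps

def obj_cnt_pos (obj_pos_cnt_dict : List (String × List (String × Int))) : String :=
  let outer := PySem.Dict.ofList (obj_pos_cnt_dict.map (fun q => (q.1, PySem.Dict.ofList q.2)))
  objCntAOuter outer "" outer.keys

-- ===== PORT B =====
-- _core(cnt, i, p)
def objCntBCore (cnt : Int) (i p : String) : String :=
  if cnt == 1 then PySem.Int.toStr cnt ++ " " ++ i ++ " in the " ++ p
  else PySem.Int.toStr cnt ++ " " ++ i ++ "s in the " ++ p

-- pass 1: parts list of (core, is_singular, is_last_key); append-only nested loops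
def objCntBParts (outer : PySem.Dict String (PySem.Dict String Int)) :
    List (String × Bool × Bool) :=
  outer.items.foldl
    (fun acc pe =>
      let lastK := PySem.List.pyGet? pe.2.keys (-1)  -- keys[-1] if keys else None
      acc ++ pe.2.items.filterMap (fun ic =>
        if ic.2 ≥ 1 then some (objCntBCore ic.2 ic.1 pe.1, ic.2 == 1, some ic.1 == lastK)
        else none))
    []

-- "There is/are " + core for parts[0]
def objCntBFirst (e : String × Bool × Bool) : String :=
  (if e.2.1 then "There is " else "There are ") ++ e.1

-- out += (" and " if is_last else ", ") + core
def objCntBSep (out : String) (e : String × Bool × Bool) : String :=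
  out ++ (if e.2.2 then " and " else ", ") ++ e.1

def obj_cnt_pos_alt (obj_pos_cnt_dict : List (String × List (String × Int))) : String :=
  let outer := PySem.Dict.ofList (obj_pos_cnt_dict.map (fun q => (q.1, PySem.Dict.ofList q.2)))
  match objCntBParts outer with
  | [] => ""
  | e :: rest => rest.foldl objCntBSep (objCntBFirst e)

-- ===== PRECONDITION & SPEC =====
def Spec_obj_cnt_pos (obj_pos_cnt_dict : List (String × List (String × Int))) (out : String) : Prop := out = obj_cnt_pos_alt obj_pos_cnt_dict
instance (obj_pos_cnt_dict : List (String × List (String × Int))) (out : String) : Decidable (Spec_obj_cnt_pos obj_pos_cnt_dict out) := by unfold Spec_obj_cnt_pos; infer_instance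

-- ===== CLAIM (what is proved, stated in full; the proofs are below) =====
def Claim_equal_obj_cnt_pos : Prop := ∀ (obj_pos_cnt_dict : List (String × List (String × Int))), Dom_obj_cnt_pos obj_pos_cnt_dict → Spec_obj_cnt_pos obj_pos_cnt_dict (obj_cnt_pos obj_pos_cnt_dict)

-- ===== LEMMAS AND PROOFS =====

-- A's per-item update, as a step over an optional emitted entry
def objCntStepA (text : String) (e : String × Bool × Bool) : String :=
  if text == "" then objCntBFirst e else objCntBSep text e

-- the entry (if any) that item key i of position (p, d) contributes
def objCntEntry (d : PySem.Dict String Int) (p i : String) : Option (String × Bool × Bool) :=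
  if d.getD i 0 ≥ 1 then
    some (objCntBCore (d.getD i 0) i p, d.getD i 0 == 1, some i == PySem.List.pyGet? d.keys (-1))
  else none

theorem objCntBSep_ne_empty (t : String) (e : String × Bool × Bool) : objCntBSep t e ≠ "" := by
  unfold objCntBSep
  split_ifs <;> (intro he; have := congrArg String.toList he; simp at this)

theorem objCntBFirst_ne_empty (e : String × Bool × Bool) : objCntBFirst e ≠ "" := by
  unfold objCntBFirst
  split_ifs <;> (intro he; have := congrArg String.toList he; simp at this)

-- once text is nonempty, A's step is B's separator step
theorem foldl_stepA_of_ne_empty (es : List (String × Bool × Bool)) :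
    ∀ t : String, t ≠ "" → es.foldl objCntStepA t = es.foldl objCntBSep t := by
  induction es with
  | nil => intro t _; rfl
  | cons e rest ih =>
    intro t ht
    have hb : (t == "") = false := by simp [ht]
    simp only [List.foldl_cons, objCntStepA, hb]
    exact ih _ (objCntBSep_ne_empty t e)

-- folding A's step from "" is exactly B's assembly pass
theorem foldl_stepA_empty (es : List (String × Bool × Bool)) :
    es.foldl objCntStepA "" =
      (match es with
       | [] => ""
       | e :: rest => rest.foldl objCntBSep (objCntBFirst e)) := by
  cases es with
  | nil => rfl
  | cons e rest =>
    simp only [List.foldl_cons]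
    have : objCntStepA "" e = objCntBFirst e := by simp [objCntStepA]
    rw [this]
    exact foldl_stepA_of_ne_empty rest _ (objCntBFirst_ne_empty e)

-- A's inner loop is a fold of objCntStepA over the entries its keys emit
theorem objCntAInner_eq_foldl (d : PySem.Dict String Int) (p : String)
    (hne : d.keys ≠ []) :
    ∀ (keys : List String) (text : String),
      objCntAInner d p text keys =
        (keys.filterMap (objCntEntry d p)).foldl objCntStepA text := by
  intro keys
  induction keys with
  | nil => intro text; rfl
  | cons i rest ih =>
    intro text
    rw [objCntAInner]
    have hlast : PySem.List.pyGet? d.keys (-1) = some (d.keys.getLast hne) := by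
      rw [PySem.List.pyGet?_neg_one, List.getLast?_eq_getLast_of_ne_nil hne]
    have hstep :
        (if text == "" then
          if d.getD i 0 == 1 then
            text ++ "There is " ++ PySem.Int.toStr (d.getD i 0) ++ " " ++ i ++ " in the " ++ p
          else if d.getD i 0 > 1 then
            text ++ "There are " ++ PySem.Int.toStr (d.getD i 0) ++ " " ++ i ++ "s in the " ++ p
          else text
        else
          if i == (PySem.List.pyGet? d.keys (-1)).getD "" then
            if d.getD i 0 == 1 then
              text ++ " and " ++ PySem.Int.toStr (d.getD i 0) ++ " " ++ i ++ " in the " ++ p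
            else if d.getD i 0 > 1 then
              text ++ " and " ++ PySem.Int.toStr (d.getD i 0) ++ " " ++ i ++ "s in the " ++ p
            else text
          else
            if d.getD i 0 == 1 then
              text ++ ", " ++ PySem.Int.toStr (d.getD i 0) ++ " " ++ i ++ " in the " ++ p
            else if d.getD i 0 > 1 then
              text ++ ", " ++ PySem.Int.toStr (d.getD i 0) ++ " " ++ i ++ "s in the " ++ p
            else text) =
        (match objCntEntry d p i with
         | none => text
         | some e => objCntStepA text e) := by
      unfold objCntEntry objCntStepA objCntBFirst objCntBSep objCntBCore
      rw [hlast]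
      by_cases h1 : d.getD i 0 = 1
      · simp only [h1]
        split_ifs <;> simp_all [String.append_assoc]
      · by_cases h2 : d.getD i 0 > 1
        · have hge : d.getD i 0 ≥ 1 := by omega
          split_ifs <;> simp_all [String.append_assoc]
        · have hlt : ¬ d.getD i 0 ≥ 1 := by omega
          split_ifs <;> simp_all [String.append_assoc]
    rw [hstep]
    cases he : objCntEntry d p i with
    | none => simp only [List.filterMap_cons, he]; exact ih text
    | some e => simp only [List.filterMap_cons, he, List.foldl_cons]; exact ih _

-- A's outer loop is a fold over the concatenation of all positions' entries
theorem objCntAOuter_eq_foldl (outer : PySem.Dict String (PySem.Dict String Int)) :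
    ∀ (ps : List String) (text : String),
      objCntAOuter outer text ps =
        (ps.flatMap (fun p =>
          (outer.getD p PySem.Dict.empty).keys.filterMap
            (objCntEntry (outer.getD p PySem.Dict.empty) p))).foldl objCntStepA text := by
  intro ps
  induction ps with
  | nil => intro text; rfl
  | cons p rest ih =>
    intro text
    rw [objCntAOuter]
    rw [List.flatMap_cons, List.foldl_append]
    rw [← ih]
    congr 1
    by_cases hne : (outer.getD p PySem.Dict.empty).keys = []
    · rw [hne]; rfl
    · exact objCntAInner_eq_foldl _ p hne _ text

-- every value of the converted outer dict has Nodup keys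
theorem objCntFoldlInsert_values_nodup
    (qs : List (String × PySem.Dict String Int)) :
    ∀ (d : PySem.Dict String (PySem.Dict String Int)),
      (∀ v ∈ d.values, v.keys.Nodup) → (∀ q ∈ qs, q.2.keys.Nodup) →
      ∀ v ∈ (qs.foldl (fun acc q => acc.insert q.1 q.2) d).values, v.keys.Nodup := by
  induction qs with
  | nil => intro d hd _ v hv; exact hd v hv
  | cons q rest ih =>
    intro d hd hq
    rw [List.foldl_cons]
    refine ih _ ?_ (fun q' hq' => hq q' (List.mem_cons_of_mem _ hq'))
    intro v hv
    rcases PySem.Dict.mem_values_insert d q.1 q.2 v hv with h | h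
    · exact h ▸ hq q (List.mem_cons_self)
    · exact hd v h

theorem objCntOuter_values_nodup (l : List (String × List (String × Int)))
    (p : String) :
    ((PySem.Dict.ofList (l.map (fun q => (q.1, PySem.Dict.ofList q.2)))).getD p
      PySem.Dict.empty).keys.Nodup := by
  rw [PySem.Dict.getD_eq_get?_getD]
  cases hg : (PySem.Dict.ofList (l.map (fun q => (q.1, PySem.Dict.ofList q.2)))).get? p with
  | none => exact List.nodup_nil
  | some v =>
    have hmem : (p, v) ∈ (PySem.Dict.ofList (l.map (fun q => (q.1, PySem.Dict.ofList q.2)))).items :=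
      PySem.Dict.mem_items_of_get?_eq_some _ hg
    have hval : v ∈ (PySem.Dict.ofList (l.map (fun q => (q.1, PySem.Dict.ofList q.2)))).values :=
      List.mem_map_of_mem hmem
    have hfold : PySem.Dict.ofList (l.map (fun q => (q.1, PySem.Dict.ofList q.2))) =
        (l.map (fun q => (q.1, PySem.Dict.ofList q.2))).foldl
          (fun acc q => acc.insert q.1 q.2) PySem.Dict.empty := rfl
    rw [hfold] at hval
    refine objCntFoldlInsert_values_nodup _ PySem.Dict.empty
      (by intro v hv; simp [PySem.Dict.empty, PySem.Dict.values] at hv) ?_ v hval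
    intro q hq
    rcases List.mem_map.mp hq with ⟨q', _, rfl⟩
    exact PySem.Dict.nodup_keys_ofList _

-- B's parts list equals the flatMap A's fold runs over
theorem objCntBParts_eq (outer : PySem.Dict String (PySem.Dict String Int))
    (hnodup : outer.keys.Nodup)
    (hvals : ∀ p : String, (outer.getD p PySem.Dict.empty).keys.Nodup) :
    objCntBParts outer =
      outer.keys.flatMap (fun p =>
        (outer.getD p PySem.Dict.empty).keys.filterMap
          (objCntEntry (outer.getD p PySem.Dict.empty) p)) := by
  unfold objCntBParts
  rw [PySem.List.foldl_append_eq_flatMap, List.nil_append]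
  rw [PySem.Dict.items_eq_map_keys outer hnodup PySem.Dict.empty, List.flatMap_map]
  congr 1
  funext p
  simp only []
  rw [PySem.Dict.items_eq_map_keys _ (hvals p) 0, List.filterMap_map]
  rfl

-- ===== VERDICT (by name: the statement is the Claim_ definition above) =====
theorem obj_cnt_pos_spec : Claim_equal_obj_cnt_pos := by
  intro l _
  show objCntAOuter (PySem.Dict.ofList (l.map (fun q => (q.1, PySem.Dict.ofList q.2)))) ""
        (PySem.Dict.ofList (l.map (fun q => (q.1, PySem.Dict.ofList q.2)))).keys =
      (match objCntBParts (PySem.Dict.ofList (l.map (fun q => (q.1, PySem.Dict.ofList q.2)))) with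
       | [] => ""
       | e :: rest => rest.foldl objCntBSep (objCntBFirst e))
  rw [objCntAOuter_eq_foldl]
  rw [objCntBParts_eq _ (PySem.Dict.nodup_keys_ofList _) (objCntOuter_values_nodup l)]
  exact foldl_stepA_empty _
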